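-- pv_equiv track=rewrite | github.com/malikobeidin/maryam | freegroup.py | unique_max_and_min
-- ===== SOURCE A (Python) =====
-- def unique_max_and_min(walk):
--     max_height = max(walk)
--     min_height = min(walk)
--     max_count = 0
--     min_count = 0
--     for i in range(len(walk)-1):
--         height, next_height = walk[i], walk[i+1]
--         if height == next_height == max_height:
--             max_count += 1
--         elif height == next_height == min_height:
--             min_count += 1
--     return (max_count < 2) and (min_count < 2)
-- ===== SOURCE B (Python) =====
-- def unique_max_and_min(walk):
--     it = iter(walk)
--     try:
--         prev = next(it)
--     except StopIteration:
--         raise ValueError("max() arg is an empty sequence")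
--     cur_max = cur_min = prev
--     max_count = min_count = 0
--     for x in it:
--         if x > cur_max:
--             cur_max, max_count = x, 0
--         if x < cur_min:
--             cur_min, min_count = x, 0
--         if prev == x:
--             if x == cur_max:
--                 max_count += 1
--             if x == cur_min:
--                 min_count += 1
--         prev = x
--     return max_count < 2 and min_count < 2
-- ===== Notes on version B (the rewrite author's own statement) =====
-- stated objective: alternative
-- what changed: Replaced A's three separate scans (max, min, then an indexed pair loop comparing against the global extremes) by a single left-to-right pass that maintains the running max/min together with pair counters that are reset to zero whenever a new strict extreme appears.
-- outside the precondition, e.g. on unique_max_and_min([]): A raises ValueError, B raises ValueError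
import Mathlib
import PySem

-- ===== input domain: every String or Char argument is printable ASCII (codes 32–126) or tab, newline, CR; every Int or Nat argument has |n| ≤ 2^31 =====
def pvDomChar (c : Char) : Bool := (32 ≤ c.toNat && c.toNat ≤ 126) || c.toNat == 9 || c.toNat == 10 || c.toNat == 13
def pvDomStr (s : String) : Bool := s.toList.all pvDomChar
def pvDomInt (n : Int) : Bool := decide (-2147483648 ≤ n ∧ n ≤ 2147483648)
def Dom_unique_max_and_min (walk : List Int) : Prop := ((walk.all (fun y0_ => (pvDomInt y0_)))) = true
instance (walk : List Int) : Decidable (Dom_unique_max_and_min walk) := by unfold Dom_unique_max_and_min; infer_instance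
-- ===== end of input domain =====

-- B replaces A's three scans (max, min, indexed pair loop) by one pass with running extremes and
-- counters reset when a new strict extreme appears; same result, alternative algorithm (not claimed faster).

-- ===== PORT A =====
def unique_max_and_min (walk : List Int) : Bool :=
  match PySem.List.max? walk (fun x => x), PySem.List.min? walk (fun x => x) with
  | some max_height, some min_height =>
    let st := (PySem.List.pyRange 0 ((walk.length : Int) - 1) 1).foldl
      (fun (st : Int × Int) i =>
        let height := PySem.List.pyGetD walk i 0
        let next_height := PySem.List.pyGetD walk (i + 1) 0
        if height = next_height ∧ next_height = max_height then (st.1 + 1, st.2)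
        else if height = next_height ∧ next_height = min_height then (st.1, st.2 + 1)
        else st) ((0 : Int), (0 : Int))
    decide (st.1 < 2) && decide (st.2 < 2)
  | _, _ => false

-- ===== PORT B =====
-- loop body of Source B's single pass (state: prev, cur_max, cur_min, max_count, min_count)
def altStep (st : Int × Int × Int × Int × Int) (x : Int) : Int × Int × Int × Int × Int :=
  let prev := st.1
  let cmax := st.2.1
  let cmin := st.2.2.1
  let mc0 := st.2.2.2.1
  let nc0 := st.2.2.2.2
  let cmax' := if cmax < x then x else cmax
  let mc1 := if cmax < x then 0 else mc0
  let cmin' := if x < cmin then x else cmin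
  let nc1 := if x < cmin then 0 else nc0
  let mc2 := if prev = x ∧ x = cmax' then mc1 + 1 else mc1
  let nc2 := if prev = x ∧ x = cmin' then nc1 + 1 else nc1
  (x, cmax', cmin', mc2, nc2)

def unique_max_and_min_alt (walk : List Int) : Bool :=
  match walk with
  | [] => false  -- Python B raises ValueError here; excluded by Pre_
  | p :: rest =>
    let st := rest.foldl altStep (p, p, p, (0 : Int), (0 : Int))
    decide (st.2.2.2.1 < 2) && decide (st.2.2.2.2 < 2)

-- ===== PRECONDITION & SPEC =====
-- Pre_ excludes only the empty list, on which A's max([]) raises ValueError.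
def Pre_unique_max_and_min (walk : List Int) : Prop := walk ≠ []
instance (walk : List Int) : Decidable (Pre_unique_max_and_min walk) := by unfold Pre_unique_max_and_min; infer_instance
def pvWitness_unique_max_and_min : List Int := [1, 2, 1]

def Spec_unique_max_and_min (walk : List Int) (out : Bool) : Prop := out = unique_max_and_min_alt walk
instance (walk : List Int) (out : Bool) : Decidable (Spec_unique_max_and_min walk out) := by unfold Spec_unique_max_and_min; infer_instance

-- ===== CLAIM (what is proved, stated in full; the proofs are below) =====
def Claim_equal_unique_max_and_min : Prop := ∀ (walk : List Int), Dom_unique_max_and_min walk → Pre_unique_max_and_min walk → Spec_unique_max_and_min walk (unique_max_and_min walk)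

-- ===== LEMMAS AND PROOFS =====

-- reference notions on a nonempty list written as head p and tail rest
def mxOf (p : Int) (rest : List Int) : Int := rest.foldl max p
def mnOf (p : Int) (rest : List Int) : Int := rest.foldl min p
def lstOf (p : Int) (rest : List Int) : Int := rest.getLastD p
def prsOf (p : Int) (rest : List Int) : List (Int × Int) := (p :: rest).zip rest
def cntOf (v p : Int) (rest : List Int) : Int :=
  ((prsOf p rest).countP (fun q => decide (q.1 = q.2 ∧ q.2 = v)) : Int)

theorem prs_snoc (p : Int) (rest : List Int) (x : Int) :
    prsOf p (rest ++ [x]) = prsOf p rest ++ [(lstOf p rest, x)] := by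
  induction rest generalizing p with
  | nil => simp [prsOf, lstOf]
  | cons a t ih =>
    have h1 : prsOf p ((a :: t) ++ [x]) = (p, a) :: prsOf a (t ++ [x]) := by simp [prsOf]
    have h2 : prsOf p (a :: t) = (p, a) :: prsOf a t := by simp [prsOf]
    have h3 : lstOf p (a :: t) = lstOf a t := by rw [lstOf, lstOf, List.getLastD_cons]
    rw [h1, ih a, h2, h3]
    simp

theorem mem_le_mx (p : Int) (rest : List Int) : ∀ y ∈ p :: rest, y ≤ mxOf p rest := by
  intro y hy
  rcases List.mem_cons.mp hy with h | h
  · subst h; exact (PySem.List.le_foldl_max rest y).1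
  · exact (PySem.List.le_foldl_max rest p).2 y h

theorem mn_le_mem (p : Int) (rest : List Int) : ∀ y ∈ p :: rest, mnOf p rest ≤ y := by
  intro y hy
  rcases List.mem_cons.mp hy with h | h
  · subst h; exact (PySem.List.foldl_min_le rest y).1
  · exact (PySem.List.foldl_min_le rest p).2 y h

theorem lst_mem (p : Int) (rest : List Int) : lstOf p rest ∈ p :: rest := by
  induction rest generalizing p with
  | nil => simp [lstOf]
  | cons a t ih =>
    have h3 : lstOf p (a :: t) = lstOf a t := by rw [lstOf, lstOf, List.getLastD_cons]
    rw [h3]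
    exact List.mem_cons_of_mem p (ih a)

theorem prs_mem (p : Int) (rest : List Int) (q : Int × Int) (h : q ∈ prsOf p rest) :
    q.1 ∈ p :: rest ∧ q.2 ∈ p :: rest := by
  obtain ⟨a, b⟩ := q
  have h2 := List.of_mem_zip h
  exact ⟨h2.1, List.mem_cons_of_mem p h2.2⟩

theorem cnt_snoc (v p : Int) (rest : List Int) (x : Int) :
    cntOf v p (rest ++ [x]) =
      cntOf v p rest + (if lstOf p rest = x ∧ x = v then 1 else 0) := by
  simp only [cntOf, prs_snoc, List.countP_append, List.countP_cons, List.countP_nil]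
  by_cases h : lstOf p rest = x ∧ x = v
  · simp [h]
  · simp [h]

theorem cnt_gt_zero (v p : Int) (rest : List Int) (h : ∀ y ∈ p :: rest, y ≠ v) :
    cntOf v p rest = 0 := by
  simp only [cntOf]
  rw [List.countP_eq_zero.mpr]
  · simp
  · intro q hq
    have := (prs_mem p rest q hq).2
    simp only [decide_eq_true_eq, not_and]
    intro _ hv
    exact h q.2 this hv

theorem altStep_state (p : Int) (pre : List Int) (x : Int) :
    altStep (lstOf p pre, mxOf p pre, mnOf p pre,
             cntOf (mxOf p pre) p pre, cntOf (mnOf p pre) p pre) x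
      = (lstOf p (pre ++ [x]), mxOf p (pre ++ [x]), mnOf p (pre ++ [x]),
         cntOf (mxOf p (pre ++ [x])) p (pre ++ [x]),
         cntOf (mnOf p (pre ++ [x])) p (pre ++ [x])) := by
  have hlst : lstOf p (pre ++ [x]) = x := by
    simp [lstOf]
  have hmx : mxOf p (pre ++ [x]) = max (mxOf p pre) x := by
    simp [mxOf, List.foldl_append]
  have hmn : mnOf p (pre ++ [x]) = min (mnOf p pre) x := by
    simp [mnOf, List.foldl_append]
  have hlle : lstOf p pre ≤ mxOf p pre := mem_le_mx p pre _ (lst_mem p pre)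
  have hlge : mnOf p pre ≤ lstOf p pre := mn_le_mem p pre _ (lst_mem p pre)
  simp only [altStep, Prod.mk.injEq, hlst, hmx, hmn]
  refine ⟨trivial, ?_, ?_, ?_, ?_⟩
  · by_cases h : mxOf p pre < x <;> simp [h] <;> omega
  · by_cases h : x < mnOf p pre <;> simp [h] <;> omega
  · by_cases h : mxOf p pre < x
    · have hM : max (mxOf p pre) x = x := by omega
      rw [hM, cnt_snoc]
      have h0 : cntOf x p pre = 0 := by
        apply cnt_gt_zero
        intro y hy
        have := mem_le_mx p pre y hy
        omega
      simp [h, h0]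
    · have hM : max (mxOf p pre) x = mxOf p pre := by omega
      rw [hM, cnt_snoc]
      by_cases h2 : lstOf p pre = x ∧ x = mxOf p pre <;> simp [h, h2]
  · by_cases h : x < mnOf p pre
    · have hM : min (mnOf p pre) x = x := by omega
      rw [hM, cnt_snoc]
      have h0 : cntOf x p pre = 0 := by
        apply cnt_gt_zero
        intro y hy
        have := mn_le_mem p pre y hy
        omega
      simp [h, h0]
    · have hM : min (mnOf p pre) x = mnOf p pre := by omega
      rw [hM, cnt_snoc]
      by_cases h2 : lstOf p pre = x ∧ x = mnOf p pre <;> simp [h, h2]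

theorem alt_inv (rest : List Int) : ∀ (p : Int) (pre : List Int),
    rest.foldl altStep (lstOf p pre, mxOf p pre, mnOf p pre,
                        cntOf (mxOf p pre) p pre, cntOf (mnOf p pre) p pre)
      = (lstOf p (pre ++ rest), mxOf p (pre ++ rest), mnOf p (pre ++ rest),
         cntOf (mxOf p (pre ++ rest)) p (pre ++ rest),
         cntOf (mnOf p (pre ++ rest)) p (pre ++ rest)) := by
  induction rest with
  | nil => intro p pre; simp
  | cons x t ih =>
    intro p pre
    rw [List.foldl_cons, altStep_state, ih p (pre ++ [x])]
    simp

theorem alt_char (p : Int) (rest : List Int) :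
    unique_max_and_min_alt (p :: rest)
      = (decide (cntOf (mxOf p rest) p rest < 2) && decide (cntOf (mnOf p rest) p rest < 2)) := by
  have h0 : (p, p, p, (0 : Int), (0 : Int))
      = (lstOf p ([] : List Int), mxOf p [], mnOf p [],
         cntOf (mxOf p []) p [], cntOf (mnOf p []) p []) := by
    simp [lstOf, mxOf, mnOf, cntOf, prsOf]
  show (decide ((rest.foldl altStep (p, p, p, (0 : Int), (0 : Int))).2.2.2.1 < 2) &&
        decide ((rest.foldl altStep (p, p, p, (0 : Int), (0 : Int))).2.2.2.2 < 2)) = _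
  rw [h0, alt_inv rest p []]
  simp

theorem foldIdx {σ : Type} (xs : List Int) (f : σ → Int → Int → σ) (init : σ) :
    (List.range (xs.length - 1)).foldl
        (fun acc k => f acc (xs.getD k 0) (xs.getD (k + 1) 0)) init
      = (xs.zip xs.tail).foldl (fun acc q => f acc q.1 q.2) init := by
  induction xs generalizing init with
  | nil => simp
  | cons a tl ih =>
    cases tl with
    | nil => simp
    | cons b zs =>
      have hlen : (a :: b :: zs).length - 1 = zs.length + 1 := by simp
      rw [hlen, List.range_succ_eq_map, List.foldl_cons, List.foldl_map]
      have hbody : (fun (acc : σ) (k : ℕ) =>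
          f acc ((a :: b :: zs).getD (k + 1) 0) ((a :: b :: zs).getD (k + 1 + 1) 0))
          = fun acc k => f acc ((b :: zs).getD k 0) ((b :: zs).getD (k + 1) 0) := by
        funext acc k
        simp
      have hih := ih (f init ((a :: b :: zs).getD 0 0) ((a :: b :: zs).getD (0 + 1) 0))
      simp only [List.length_cons, Nat.add_sub_cancel] at hih
      simp only [Nat.succ_eq_add_one, hbody]
      rw [hih]
      simp

theorem foldA {σ : Type} (xs : List Int) (f : σ → Int → Int → σ) (init : σ) :
    (PySem.List.pyRange 0 ((xs.length : Int) - 1) 1).foldl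
        (fun acc i => f acc (PySem.List.pyGetD xs i 0) (PySem.List.pyGetD xs (i + 1) 0)) init
      = (xs.zip xs.tail).foldl (fun acc q => f acc q.1 q.2) init := by
  rw [PySem.List.pyRange_one]
  have hn : ((xs.length : Int) - 1 - 0).toNat = xs.length - 1 := by omega
  rw [hn, List.foldl_map]
  have hbody : (fun (acc : σ) (k : ℕ) =>
      f acc (PySem.List.pyGetD xs (0 + (k : Int)) 0) (PySem.List.pyGetD xs (0 + (k : Int) + 1) 0))
      = fun acc k => f acc (xs.getD k 0) (xs.getD (k + 1) 0) := by
    funext acc k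
    simp only [zero_add]
    rw [show ((k : ℕ) : Int) + 1 = ((k + 1 : ℕ) : Int) from by push_cast; ring,
        PySem.List.pyGetD_natCast, PySem.List.pyGetD_natCast]
  rw [hbody]
  exact foldIdx xs f init

theorem foldCnt (M m : Int) (l : List (Int × Int)) : ∀ (ac bc : Int),
    l.foldl (fun (st : Int × Int) q =>
        if q.1 = q.2 ∧ q.2 = M then (st.1 + 1, st.2)
        else if q.1 = q.2 ∧ q.2 = m then (st.1, st.2 + 1)
        else st) (ac, bc)
      = (ac + (l.countP (fun q => decide (q.1 = q.2 ∧ q.2 = M)) : Int),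
         bc + (l.countP (fun q => decide (q.1 = q.2 ∧ q.2 = m ∧ ¬ q.2 = M)) : Int)) := by
  induction l with
  | nil => intro ac bc; simp
  | cons q t ih =>
    intro ac bc
    rw [List.foldl_cons]
    by_cases h1 : q.1 = q.2 ∧ q.2 = M
    · rw [if_pos h1, ih]
      have h2 : ¬ (q.1 = q.2 ∧ q.2 = m ∧ ¬ q.2 = M) := fun hc => hc.2.2 h1.2
      rw [List.countP_cons, List.countP_cons, if_pos (by simpa using h1),
          if_neg (by simpa using h2)]
      simp only [Prod.mk.injEq]
      constructor <;> (push_cast; ring)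
    · by_cases h2 : q.1 = q.2 ∧ q.2 = m
      · rw [if_neg h1, if_pos h2, ih]
        have h3 : q.1 = q.2 ∧ q.2 = m ∧ ¬ q.2 = M := ⟨h2.1, h2.2, fun hc => h1 ⟨h2.1, hc⟩⟩
        rw [List.countP_cons, List.countP_cons, if_neg (by simpa using h1),
            if_pos (by simpa using h3)]
        simp only [Prod.mk.injEq]
        constructor <;> (push_cast; ring)
      · have h3 : ¬ (q.1 = q.2 ∧ q.2 = m ∧ ¬ q.2 = M) := fun hc => h2 ⟨hc.1, hc.2.1⟩
        rw [if_neg h1, if_neg h2, ih]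
        rw [List.countP_cons, List.countP_cons, if_neg (by simpa using h1),
            if_neg (by simpa using h3)]
        simp

theorem a_char (p : Int) (rest : List Int) :
    unique_max_and_min (p :: rest)
      = (decide (cntOf (mxOf p rest) p rest < 2) &&
         decide ((((prsOf p rest).countP
            (fun q => decide (q.1 = q.2 ∧ q.2 = mnOf p rest ∧ ¬ q.2 = mxOf p rest)) : Int)) < 2)) := by
  simp only [unique_max_and_min, PySem.List.max?_id_cons, PySem.List.min?_id_cons]
  have h1 : (PySem.List.pyRange 0 (((p :: rest).length : Int) - 1) 1).foldl
      (fun (st : Int × Int) i =>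
        if PySem.List.pyGetD (p :: rest) i 0 = PySem.List.pyGetD (p :: rest) (i + 1) 0 ∧
            PySem.List.pyGetD (p :: rest) (i + 1) 0 = rest.foldl max p then (st.1 + 1, st.2)
        else if PySem.List.pyGetD (p :: rest) i 0 = PySem.List.pyGetD (p :: rest) (i + 1) 0 ∧
            PySem.List.pyGetD (p :: rest) (i + 1) 0 = rest.foldl min p then (st.1, st.2 + 1)
        else st) ((0 : Int), (0 : Int))
      = ((p :: rest).zip rest).foldl
          (fun (st : Int × Int) q =>
            if q.1 = q.2 ∧ q.2 = rest.foldl max p then (st.1 + 1, st.2)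
            else if q.1 = q.2 ∧ q.2 = rest.foldl min p then (st.1, st.2 + 1)
            else st) ((0 : Int), (0 : Int)) :=
    foldA (p :: rest)
      (fun st h n =>
        if h = n ∧ n = rest.foldl max p then (st.1 + 1, st.2)
        else if h = n ∧ n = rest.foldl min p then (st.1, st.2 + 1)
        else st) ((0 : Int), (0 : Int))
  rw [h1, foldCnt]
  simp [cntOf, prsOf, mxOf, mnOf]

-- ===== VERDICT (by name: the statement is the Claim_ definition above) =====
theorem unique_max_and_min_spec : Claim_equal_unique_max_and_min := by
  intro walk _ hpre
  unfold Spec_unique_max_and_min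
  cases walk with
  | nil => exact absurd rfl hpre
  | cons p rest =>
    rw [a_char, alt_char]
    by_cases hMm : mxOf p rest = mnOf p rest
    · have hc : (((prsOf p rest).countP
          (fun q => decide (q.1 = q.2 ∧ q.2 = mnOf p rest ∧ ¬ q.2 = mxOf p rest))) : Int) = 0 := by
        rw [List.countP_eq_zero.mpr]
        · simp
        · intro q hq
          simp only [decide_eq_true_eq, not_and]
          intro _ h2 
          rw [h2, ← hMm]
          simp
      rw [hc]
      have hcc : cntOf (mnOf p rest) p rest = cntOf (mxOf p rest) p rest := by rw [hMm]
      rw [hcc]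
      by_cases h2 : cntOf (mxOf p rest) p rest < 2 <;> simp [h2]
    · have hco : (prsOf p rest).countP
          (fun q => decide (q.1 = q.2 ∧ q.2 = mnOf p rest ∧ ¬ q.2 = mxOf p rest))
          = (prsOf p rest).countP (fun q => decide (q.1 = q.2 ∧ q.2 = mnOf p rest)) := by
        apply List.countP_congr
        intro q hq
        simp only [decide_eq_true_eq]
        constructor
        · rintro ⟨ha, hb, _⟩
          exact ⟨ha, hb⟩
        · rintro ⟨ha, hb⟩
          refine ⟨ha, hb, fun hcx => hMm ?_⟩
          rw [← hcx, ← hb]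
      simp only [cntOf]
      rw [hco]
      rfl
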